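-- pv_equiv track=rewrite | github.com/rayenthabet-sys/SalesGenius | sales_agent.py | extract_next_steps
-- ===== SOURCE A (Python) =====
-- def extract_next_steps(message: str) -> list:
--     """Extract next steps from agent message"""
--     next_steps = []
--     lines = message.split('\n')
--     in_next_steps = False
--
--     for line in lines:
--         if 'next step' in line.lower() or 'action item' in line.lower():
--             in_next_steps = True
--         if in_next_steps and line.strip().startswith(('-', '•', '*')):
--             next_steps.append(line.strip()[1:].strip())
--
--     return next_steps[:5]
-- ===== SOURCE B (Python) =====
-- def extract_next_steps(message: str) -> list:
--     """Extract next steps: locate the earliest marker by substring search on the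
--     raw lowercased text, convert that character offset to a line number by
--     counting newlines before it, then walk the remaining lines recursively,
--     stopping as soon as five bullets are collected."""
--     low = message.lower()
--     hits = [p for p in (low.find('next step'), low.find('action item')) if p >= 0]
--     if not hits:
--         return []
--     i = low[:min(hits)].count('\n')
--     return _bullets(message.split('\n')[i:], 5)
--
--
-- def _bullets(lines, quota):
--     if quota == 0 or not lines:
--         return []
--     head, rest = lines[0].strip(), lines[1:]
--     if head.startswith(('-', '•', '*')):
--         return [head[1:].strip()] + _bullets(rest, quota - 1)
--     return _bullets(rest, quota)
-- ===== Notes on version B (the rewrite author's own statement) =====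
-- stated objective: alternative
-- what changed: A scans line by line with a latching boolean flag and always visits every line; B never scans lines for the marker at all: it substring-searches the lowercased raw text for the earliest marker occurrence, converts that character offset to a line index by counting newlines before it, and then collects bullets with an early-terminating recursion that stops as soon as five are found.
import Mathlib
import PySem

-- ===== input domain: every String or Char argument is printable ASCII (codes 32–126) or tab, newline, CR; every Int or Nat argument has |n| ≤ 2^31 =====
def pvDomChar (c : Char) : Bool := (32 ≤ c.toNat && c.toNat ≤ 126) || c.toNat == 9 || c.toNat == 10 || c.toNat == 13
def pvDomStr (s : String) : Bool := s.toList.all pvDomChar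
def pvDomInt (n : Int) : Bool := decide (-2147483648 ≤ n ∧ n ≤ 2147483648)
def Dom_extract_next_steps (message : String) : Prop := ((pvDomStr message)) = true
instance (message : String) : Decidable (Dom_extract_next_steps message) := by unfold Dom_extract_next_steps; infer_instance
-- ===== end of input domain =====

-- B replaces A's line-by-line latching-flag scan by a character-level search: it finds the
-- earliest marker occurrence in the lowercased raw text, turns that offset into a line index
-- by counting newlines before it, and collects bullets by an early-stopping recursion (objective: alternative).

-- ===== PORT A =====
def pvTrig (line : String) : Bool :=
  PySem.Str.isIn "next step" (PySem.Str.lower line) || PySem.Str.isIn "action item" (PySem.Str.lower line)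

def pvBullet (line : String) : Bool :=
  let t := PySem.Str.strip line
  PySem.Str.startswith t "-" || PySem.Str.startswith t "•" || PySem.Str.startswith t "*"

def pvXform (line : String) : String :=
  PySem.Str.strip (PySem.Str.slice (PySem.Str.strip line) (some 1) none)

def pvStepA (st : Bool × List String) (line : String) : Bool × List String :=
  let inNext := st.1 || pvTrig line
  let acc := if inNext && pvBullet line then st.2 ++ [pvXform line] else st.2
  (inNext, acc)

def extract_next_steps (message : String) : List String :=
  let lines := (PySem.Str.split? message "\n").getD []
  let st := lines.foldl pvStepA (false, [])
  PySem.List.slice st.2 none (some 5)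

-- ===== PORT B =====
-- helper _bullets(lines, quota): collect stripped bullet bodies, stop at quota = 0
def pvBullets (lines : List String) (quota : Int) : List String :=
  if quota = 0 then []
  else
    match lines with
    | [] => []
    | l :: rest =>
      let head := PySem.Str.strip l
      if PySem.Str.startswith head "-" || PySem.Str.startswith head "•" || PySem.Str.startswith head "*" then
        PySem.Str.strip (PySem.Str.slice head (some 1) none) :: pvBullets rest (quota - 1)
      else
        pvBullets rest quota

def extract_next_steps_alt (message : String) : List String :=
  let low := PySem.Str.lower message
  let hits := [PySem.Str.find low "next step", PySem.Str.find low "action item"].filter (fun p => decide (0 ≤ p))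
  match PySem.List.min? hits (fun p => p) with
  | none => []
  | some m =>
    let i : Nat := PySem.Str.count (PySem.Str.slice low none (some m)) "\n"
    pvBullets (PySem.List.slice ((PySem.Str.split? message "\n").getD []) (some (i : Int)) none) 5

-- ===== PRECONDITION & SPEC =====
def Spec_extract_next_steps (message : String) (out : List String) : Prop := out = extract_next_steps_alt message
instance (message : String) (out : List String) : Decidable (Spec_extract_next_steps message out) := by unfold Spec_extract_next_steps; infer_instance

-- ===== CLAIM (what is proved, stated in full; the proofs are below) =====
def Claim_equal_extract_next_steps : Prop := ∀ (message : String), Dom_extract_next_steps message → Spec_extract_next_steps message (extract_next_steps message)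

-- ===== LEMMAS AND PROOFS =====

def pvSplit (pre : List Char) : List Char → List (List Char)
  | [] => [pre]
  | c :: r => if c = '\n' then pre :: pvSplit [] r else pvSplit (pre ++ [c]) r

theorem pvSplit_go (fuel : Nat) (l cur : List Char) (acc : List (List Char))
    (h : l.length < fuel) :
    PySem.Chars.splitOn.go ['\n'] fuel l cur acc = acc.reverse ++ pvSplit cur.reverse l := by
  induction fuel generalizing l cur acc with
  | zero => omega
  | succ n ih =>
    cases l with
    | nil => simp [PySem.Chars.splitOn.go, pvSplit]
    | cons c r =>
      simp only [PySem.Chars.splitOn.go]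
      by_cases hc : c = '\n'
      · subst hc
        have hpre : ['\n'].isPrefixOf ('\n' :: r) = true := by simp [List.isPrefixOf]
        rw [if_pos hpre]
        simp only [List.length, List.drop_one] at *
        rw [ih]
        · simp [pvSplit]
        · simp at h ⊢; omega
      · have hpre : ['\n'].isPrefixOf (c :: r) = false := by
          simp [List.isPrefixOf]; exact fun e => hc e.symm
        rw [if_neg (by simp [hpre])]
        rw [ih]
        · simp [pvSplit, hc]
        · simp at h ⊢; omega

theorem splitOn_eq_pvSplit (s : List Char) :
    PySem.Chars.splitOn s ['\n'] = pvSplit [] s := by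
  have := pvSplit_go (s.length + 1) s [] [] (by omega)
  simpa [PySem.Chars.splitOn] using this

theorem count_go_eq (fuel : Nat) (l : List Char) (acc : Nat) (h : l.length ≤ fuel) :
    PySem.Chars.count.go ['\n'] fuel l acc = acc + l.count '\n' := by
  induction fuel generalizing l acc with
  | zero =>
    have : l = [] := by cases l <;> simp_all
    subst this; simp [PySem.Chars.count.go]
  | succ n ih =>
    cases l with
    | nil => simp [PySem.Chars.count.go]
    | cons c r =>
      simp only [PySem.Chars.count.go]
      by_cases hc : c = '\n'
      · subst hc
        rw [if_pos (by simp [List.isPrefixOf])]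
        simp only [List.length, List.drop_one] at *
        rw [ih _ _ (by simp at h ⊢; omega)]
        simp [List.count_cons]
        omega
      · rw [if_neg (by simp [List.isPrefixOf]; exact fun e => hc e.symm)]
        rw [ih _ _ (by simp at h ⊢; omega)]
        simp [List.count_cons, hc]

theorem chars_count_nl (s : List Char) :
    PySem.Chars.count s ['\n'] = s.count '\n' := by
  simp [PySem.Chars.count, count_go_eq s.length s 0 le_rfl]

theorem pvSplit_length (pre l : List Char) :
    (pvSplit pre l).length = l.count '\n' + 1 := by
  induction l generalizing pre with
  | nil => simp [pvSplit]
  | cons c r ih =>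
    by_cases hc : c = '\n' <;> simp [pvSplit, hc, ih, List.count_cons]

theorem pvSplit_head (pre l : List Char) :
    ∃ rest, pvSplit pre l = (pre ++ l.takeWhile (· ≠ '\n')) :: rest := by
  induction l generalizing pre with
  | nil => exact ⟨[], by simp [pvSplit]⟩
  | cons c r ih =>
    by_cases hc : c = '\n'
    · subst hc; exact ⟨pvSplit [] r, by simp [pvSplit, List.takeWhile]⟩
    · obtain ⟨rest, hrest⟩ := ih (pre ++ [c])
      exact ⟨rest, by simp [pvSplit, hc, hrest, List.takeWhile_cons, hc]⟩

theorem pvSplit_map (f : Char → Char) (h1 : f '\n' = '\n') (h2 : ∀ x, f x = '\n' → x = '\n')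
    (pre l : List Char) :
    pvSplit (pre.map f) (l.map f) = (pvSplit pre l).map (List.map f) := by
  induction l generalizing pre with
  | nil => simp [pvSplit]
  | cons c r ih =>
    by_cases hc : c = '\n'
    · subst hc
      simp only [List.map_cons, h1, pvSplit, if_pos rfl]
      rw [show ([] : List Char) = List.map f [] by simp, ih]
      simp [pvSplit]
    · have hfc : f c ≠ '\n' := fun e => hc (h2 c e)
      simp only [List.map_cons, pvSplit, if_neg hfc, if_neg hc]
      rw [show pre.map f ++ [f c] = (pre ++ [c]).map f by simp, ih]

theorem pvSplit_infix (pre l p : List Char) (hp : p ∈ pvSplit pre l) : p <:+: pre ++ l := by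
  induction l generalizing pre with
  | nil => simp_all [pvSplit]
  | cons c r ih =>
    by_cases hc : c = '\n'
    · subst hc
      simp only [pvSplit, if_pos rfl, List.mem_cons] at hp
      cases hp with
      | head => exact (List.prefix_append _ _).isInfix
      | tail _ hp =>
        have h1 : p <:+: r := by simpa using ih [] hp
        have h2 : r <:+ pre ++ '\n' :: r := ((List.suffix_cons '\n' r).trans (List.suffix_append pre ('\n' :: r)))
        exact h1.trans h2.isInfix
    · have := ih (pre ++ [c]) (by simpa [pvSplit, hc] using hp)
      simpa using this

theorem prefix_takeWhile (P l : List Char) (hP : '\n' ∉ P) (h : P <+: l) :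
    P <+: l.takeWhile (· ≠ '\n') := by
  induction P generalizing l with
  | nil => simp
  | cons a P ih =>
    cases l with
    | nil => simp_all
    | cons c r =>
      obtain ⟨t, ht⟩ := h
      injection ht with h1 h2
      subst h1
      have ha : a ≠ '\n' := fun e => hP (by simp [e])
      rw [List.takeWhile_cons, if_pos (by simpa using ha)]
      exact List.cons_prefix_cons.mpr ⟨rfl, ih r (fun m => hP (List.mem_cons_of_mem _ m)) ⟨t, h2⟩⟩

theorem pvSplit_pos1 (l : List Char) (P : List Char) (pre : List Char) (j : Nat)
    (hPne : P ≠ []) (hPnl : '\n' ∉ P) (h : P <+: l.drop j) :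
    (l.take j).count '\n' < (pvSplit pre l).length ∧
      P <:+: (pvSplit pre l)[(l.take j).count '\n']! := by
  induction l generalizing pre j with
  | nil =>
    simp only [List.drop_nil] at h
    exact absurd (List.prefix_nil.mp h) hPne
  | cons c r ih =>
    cases j with
    | zero =>
      simp only [List.take_zero, List.count_nil, List.drop_zero] at h ⊢
      obtain ⟨rest, hrest⟩ := pvSplit_head pre (c :: r)
      have hpw := prefix_takeWhile P (c :: r) hPnl h
      obtain ⟨u, hu⟩ := hpw
      constructor
      · rw [pvSplit_length]; omega
      · rw [hrest]
        simp only [List.getElem!_cons_zero]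
        exact ⟨pre, u, by rw [← hu]; simp⟩
    | succ j =>
      simp only [List.drop_succ_cons] at h
      by_cases hc : c = '\n'
      · subst hc
        obtain ⟨h1, h2⟩ := ih [] j h
        have e : pvSplit pre ('\n' :: r) = pre :: pvSplit [] r := by simp [pvSplit]
        rw [e, List.take_succ_cons, List.count_cons_self, List.length_cons,
          List.getElem!_cons_succ]
        exact ⟨by omega, h2⟩
      · have := ih (pre ++ [c]) j h
        simpa [pvSplit, hc, List.take_succ_cons, List.count_cons, hc] using this

theorem count_take_nlfree (pre : List Char) (n : Nat) (h : '\n' ∉ pre) :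
    (pre.take n).count '\n' = 0 :=
  List.count_eq_zero.mpr fun m => h (List.mem_of_mem_take m)

theorem pvSplit_pos2 (l : List Char) (P : List Char) (pre : List Char) (k : Nat)
    (hpre : '\n' ∉ pre) (hk : k < (pvSplit pre l).length)
    (h : P <:+: (pvSplit pre l)[k]!) :
    ∃ j, P <+: (pre ++ l).drop j ∧ ((pre ++ l).take j).count '\n' = k := by
  induction l generalizing pre k with
  | nil =>
    simp only [pvSplit, List.length_cons, List.length_nil] at hk
    interval_cases k
    simp only [pvSplit, List.getElem!_cons_zero] at h
    obtain ⟨a, b, hab⟩ := h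
    refine ⟨a.length, ?_, ?_⟩
    · rw [List.append_nil, ← hab, List.append_assoc, List.drop_left]
      exact List.prefix_append P b
    · simp only [List.append_nil]
      exact count_take_nlfree pre a.length hpre
  | cons c r ih =>
    by_cases hc : c = '\n'
    · subst hc
      simp only [pvSplit, if_pos rfl, if_true, eq_self_iff_true] at hk h
      cases k with
      | zero =>
        simp only [List.getElem!_cons_zero] at h
        obtain ⟨a, b, hab⟩ := h
        have hal : a.length ≤ pre.length := by rw [← hab]; simp
        refine ⟨a.length, ?_, ?_⟩
        · rw [← hab, List.append_assoc, List.append_assoc, List.drop_left]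
          exact List.prefix_append P _
        · rw [List.take_append_of_le_length hal]
          exact count_take_nlfree pre a.length hpre
      | succ k =>
        simp only [List.getElem!_cons_succ] at h
        simp only [List.length_cons] at hk
        obtain ⟨j, hj1, hj2⟩ := ih [] k (by simp) (by omega) (by simpa using h)
        simp only [List.nil_append] at hj1 hj2
        refine ⟨pre.length + 1 + j, ?_, ?_⟩
        · rw [List.drop_append]
          have h1 : List.drop (pre.length + 1 + j) pre = [] := by
            apply List.drop_eq_nil_of_le; omega
          have h2 : pre.length + 1 + j - pre.length = 1 + j := by omega
          rw [h1, h2]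
          simpa [List.drop_succ_cons, Nat.add_comm 1 j] using hj1
        · rw [List.take_append]
          have h1 : List.take (pre.length + 1 + j) pre = pre := by
            apply List.take_of_length_le; omega
          have h2 : pre.length + 1 + j - pre.length = 1 + j := by omega
          rw [h1, h2]
          have h3 : List.take (1 + j) ('\n' :: r) = '\n' :: List.take j r := by
            rw [Nat.add_comm 1 j]; simp [List.take_succ_cons]
          rw [h3]
          simp [List.count_append, List.count_cons, hj2, List.count_eq_zero.mpr hpre]
    · simp only [pvSplit, if_neg hc] at hk h
      have hpre' : '\n' ∉ pre ++ [c] := by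
        simp [hpre]; exact fun e => hc e.symm
      obtain ⟨j, hj1, hj2⟩ := ih (pre ++ [c]) k hpre' hk h
      rw [List.append_assoc, List.singleton_append] at hj1 hj2
      exact ⟨j, hj1, hj2⟩

theorem findIdx?_eq_some_of {α : Type} [Inhabited α] (l : List α) (p : α → Bool) (k : Nat)
    (hk : k < l.length) (h : p (l[k]!) = true) (hj : ∀ j, j < k → p (l[j]!) = false) :
    l.findIdx? p = some k := by
  induction l generalizing k with
  | nil => simp at hk
  | cons a t ih =>
    cases k with
    | zero =>
      simp only [List.getElem!_cons_zero] at h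
      simp [List.findIdx?_cons, h]
    | succ k =>
      have h0 : p a = false := by
        have := hj 0 (by omega)
        simpa using this
      simp only [List.getElem!_cons_succ] at h
      simp only [List.findIdx?_cons, h0, if_neg (by simp [h0] : ¬ p a = true)]
      rw [ih k (by simpa using hk) h (fun j hjk => by simpa using hj (j+1) (by omega))]
      rfl

theorem pvBullets_eq (lines : List String) (q : Nat) :
    pvBullets lines (q : Int) = ((lines.filter pvBullet).map pvXform).take q := by
  induction lines generalizing q with
  | nil => cases q <;> simp [pvBullets]
  | cons l rest ih =>
    cases q with
    | zero => simp [pvBullets]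
    | succ n =>
      rw [pvBullets]
      rw [if_neg (by omega : ¬ ((n+1 : Nat) : Int) = 0)]
      have hcond : pvBullet l = (PySem.Str.startswith (PySem.Str.strip l) "-" ||
          PySem.Str.startswith (PySem.Str.strip l) "•" ||
          PySem.Str.startswith (PySem.Str.strip l) "*") := rfl
      simp only [List.filter_cons]
      by_cases hb : (PySem.Str.startswith (PySem.Str.strip l) "-" ||
          PySem.Str.startswith (PySem.Str.strip l) "•" ||
          PySem.Str.startswith (PySem.Str.strip l) "*") = true
      · rw [if_pos hb, hcond, hb]
        have hq : ((n+1 : Nat) : Int) - 1 = ((n : Nat) : Int) := by omega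
        rw [hq, ih n]
        rfl
      · rw [if_neg hb, hcond, Bool.eq_false_iff.mpr hb]
        have hq : ((n+1 : Nat) : Int) = (((n+1 : Nat) : Nat) : Int) := rfl
        rw [hq, ih (n+1)]
        simp
theorem lowerChar_nl (x : Char) (h : PySem.Chars.lowerChar x = '\n') : x = '\n' := by
  unfold PySem.Chars.lowerChar at h
  split at h
  · exfalso
    rename_i hu
    simp only [PySem.Chars.isupper, Bool.and_eq_true, decide_eq_true_eq] at hu
    obtain ⟨h1, h2⟩ := hu
    have hx1 : 65 ≤ x.toNat := h1
    have hx2 : x.toNat ≤ 90 := h2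
    have h10 : (Char.ofNat (x.toNat + 32)).toNat = ('\n' : Char).toNat := by rw [h]
    rw [Char.toNat_ofNat] at h10
    have he : ('\n' : Char).toNat = 10 := rfl
    rw [he] at h10
    split at h10 <;> omega
  · exact h

-- once the flag is latched, A's loop appends every bullet line's transform
theorem pv_foldl_latched (ls : List String) (acc : List String) :
    (ls.foldl pvStepA (true, acc)).2 = acc ++ (ls.filter pvBullet).map pvXform := by
  induction ls generalizing acc with
  | nil => simp
  | cons a l ih =>
    simp only [List.foldl_cons, pvStepA, Bool.true_or, Bool.true_and, List.filter_cons]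
    by_cases h : pvBullet a = true
    · simp [h, ih]
    · simp [Bool.eq_false_iff.mpr h, ih]

-- the state kept by A's loop, characterised by trigger index then filter/map
theorem pv_core (l : List String) :
    (l.foldl pvStepA (false, [])).2 =
      match l.findIdx? pvTrig with
      | none => []
      | some i => ((l.drop i).filter pvBullet).map pvXform := by
  induction l with
  | nil => simp
  | cons a l ih =>
    by_cases h : pvTrig a = true
    · simp only [List.foldl_cons, pvStepA, h, Bool.false_or, Bool.true_and,
        List.findIdx?_cons, if_pos h]
      by_cases hb : pvBullet a = true
      · simp [hb, pv_foldl_latched]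
      · simp [hb, pv_foldl_latched, Bool.eq_false_iff.mpr hb]
    · have hf : pvTrig a = false := Bool.eq_false_iff.mpr h
      simp only [List.foldl_cons, pvStepA, hf, Bool.false_or, Bool.false_and, if_false,
        List.findIdx?_cons, if_neg h, ih]
      cases hl : l.findIdx? pvTrig with
      | none => simp [ih, hl]
      | some i => simp [ih, hl]

theorem getElem!_map {α β : Type} [Inhabited α] [Inhabited β] (f : α → β) (l : List α)
    (k : Nat) (hk : k < l.length) : (l.map f)[k]! = f (l[k]!) := by
  rw [getElem!_pos l k hk, getElem!_pos (l.map f) k (by simpa using hk)]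
  simp

-- an occurrence of P at offset j forces find to be a no-later occurrence
theorem pv_occ_find (s P : List Char) (j : Nat) (h : P <+: s.drop j) :
    0 ≤ PySem.Chars.find s P ∧ (PySem.Chars.find s P).toNat ≤ j := by
  have hin : PySem.Chars.isIn P s = true :=
    (PySem.Chars.exists_prefix_drop_iff_isIn P s).mp ⟨j, h⟩
  have hnn : 0 ≤ PySem.Chars.find s P := by
    rw [PySem.Chars.find_nonneg_iff]
    exact (PySem.Chars.isIn_iff_infix P s).mp hin
  refine ⟨hnn, ?_⟩
  by_contra hlt
  exact (PySem.Chars.find_spec hnn).2 j (by omega) h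

-- the trigger line found by A is exactly the line containing the earliest marker offset
theorem pv_trig_idx (message : String) (m : Int) (h0 : 0 ≤ m)
    (hocc : "next step".toList <+: ((PySem.Chars.lower message.toList).drop m.toNat) ∨
            "action item".toList <+: ((PySem.Chars.lower message.toList).drop m.toNat))
    (hmin : ∀ (P : List Char), (P = "next step".toList ∨ P = "action item".toList) →
              ∀ j : Nat, P <+: (PySem.Chars.lower message.toList).drop j → m.toNat ≤ j) :
    ((pvSplit [] message.toList).map String.ofList).findIdx? pvTrig =
      some (((PySem.Chars.lower message.toList).take m.toNat).count '\n') := by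
  have hNSne : ("next step".toList : List Char) ≠ [] := by decide
  have hNSnl : '\n' ∉ "next step".toList := by decide
  have hAIne : ("action item".toList : List Char) ≠ [] := by decide
  have hAInl : '\n' ∉ "action item".toList := by decide
  have hlcs : PySem.Chars.lower message.toList = message.toList.map PySem.Chars.lowerChar := rfl
  have hmap : pvSplit [] (PySem.Chars.lower message.toList) =
      (pvSplit [] message.toList).map (List.map PySem.Chars.lowerChar) := by
    rw [hlcs]
    have := pvSplit_map PySem.Chars.lowerChar rfl lowerChar_nl [] message.toList
    simpa using this
  set lcs := PySem.Chars.lower message.toList with hlcsdef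
  set parts := pvSplit [] message.toList with hparts
  set k := (lcs.take m.toNat).count '\n' with hk
  rw [List.findIdx?_map]
  -- the bound
  have hklen : k < parts.length := by
    obtain hP | hP := hocc
    · have := (pvSplit_pos1 lcs _ [] m.toNat hNSne hNSnl hP).1
      rwa [hmap, List.length_map] at this
    · have := (pvSplit_pos1 lcs _ [] m.toNat hAIne hAInl hP).1
      rwa [hmap, List.length_map] at this
  -- pvTrig of a part, in list-of-chars form
  have htrig : ∀ p : List Char, (pvTrig ∘ String.ofList) p =
      (PySem.Chars.isIn "next step".toList (p.map PySem.Chars.lowerChar) ||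
       PySem.Chars.isIn "action item".toList (p.map PySem.Chars.lowerChar)) := by
    intro p
    simp [pvTrig, PySem.Chars.lower]
  apply findIdx?_eq_some_of _ _ _ hklen
  · -- trigger holds at index k
    rw [htrig]
    obtain hP | hP := hocc
    · have h2 := (pvSplit_pos1 lcs _ [] m.toNat hNSne hNSnl hP).2
      rw [hmap] at h2
      rw [getElem!_map _ _ _ hklen] at h2
      rw [(PySem.Chars.isIn_iff_infix _ _).mpr h2]
      simp
    · have h2 := (pvSplit_pos1 lcs _ [] m.toNat hAIne hAInl hP).2
      rw [hmap] at h2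
      rw [getElem!_map _ _ _ hklen] at h2
      rw [(PySem.Chars.isIn_iff_infix _ _).mpr h2]
      simp
  · -- no trigger strictly before k
    intro j hj
    rw [htrig]
    rw [Bool.eq_false_iff]
    intro hEq'
    have hor := Bool.or_eq_true _ _ |>.mp hEq' 
    have hjlen : j < parts.length := by omega
    -- turn it into an occurrence inside lcs with j newlines before it
    have hstep : ∀ (P : List Char), P = "next step".toList ∨ P = "action item".toList →
        PySem.Chars.isIn P (parts[j]!.map PySem.Chars.lowerChar) = true → False := by
      intro P hPwhich hPin
      have hinf : P <:+: (pvSplit [] lcs)[j]! := by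
        rw [hmap, getElem!_map _ _ _ hjlen]
        exact (PySem.Chars.isIn_iff_infix _ _).mp hPin
      obtain ⟨jj, hjj1, hjj2⟩ := pvSplit_pos2 lcs P [] j (by simp)
        (by rw [hmap, List.length_map]; omega) hinf
      simp only [List.nil_append] at hjj1 hjj2
      have hmj : m.toNat ≤ jj := hmin P hPwhich jj hjj1
      have hcnt : k ≤ j := by
        rw [hk, ← hjj2]
        exact List.Sublist.count_le _ (List.take_sublist_take_left (by omega))
      omega
    obtain h | h := hor
    · exact hstep _ (Or.inl rfl) h
    · exact hstep _ (Or.inr rfl) h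


-- ===== VERDICT helper: full equality =====
theorem pv_main (message : String) :
    extract_next_steps message = extract_next_steps_alt message := by
  have hsplit : (PySem.Str.split? message "\n").getD [] =
      (pvSplit [] message.toList).map String.ofList := by
    have hnl : ("\n" : String).toList = ['\n'] := rfl
    simp [PySem.Str.split?, PySem.Chars.split?, hnl, splitOn_eq_pvSplit]
  have hlow : (PySem.Str.lower message).toList = PySem.Chars.lower message.toList := by simp
  set lcs := PySem.Chars.lower message.toList with hlcs
  have hf1 : PySem.Str.find (PySem.Str.lower message) "next step" =
      PySem.Chars.find lcs "next step".toList := by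
    simp [hlow]
  have hf2 : PySem.Str.find (PySem.Str.lower message) "action item" =
      PySem.Chars.find lcs "action item".toList := by
    simp [hlow]
  set f1 := PySem.Chars.find lcs "next step".toList with hf1d
  set f2 := PySem.Chars.find lcs "action item".toList with hf2d
  -- generic step applying the index characterisation
  have hfin : ∀ m : Int, 0 ≤ m →
      ("next step".toList <+: lcs.drop m.toNat ∨ "action item".toList <+: lcs.drop m.toNat) →
      (∀ (P : List Char), (P = "next step".toList ∨ P = "action item".toList) →
        ∀ j : Nat, P <+: lcs.drop j → m.toNat ≤ j) →
      extract_next_steps message =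
        pvBullets (PySem.List.slice ((PySem.Str.split? message "\n").getD [])
          (some ((PySem.Str.count (PySem.Str.slice (PySem.Str.lower message) none (some m)) "\n" : Nat) : Int)) none) 5 := by
    intro m h0 hocc hmin
    have hidx := pv_trig_idx message m h0 hocc hmin
    set k := ((lcs.take m.toNat).count '\n') with hk
    -- the count B computes is k
    have hcount : (PySem.Str.count (PySem.Str.slice (PySem.Str.lower message) none (some m)) "\n") = k := by
      have h1 : (PySem.Str.slice (PySem.Str.lower message) none (some m)).toList =
          PySem.List.slice lcs none (some m) := by
        simp [hlow]
      have h2 : PySem.List.slice lcs none (some m) = lcs.take m.toNat :=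
        PySem.List.slice_to lcs h0
      have h3 : ("\n" : String).toList = ['\n'] := rfl
      rw [PySem.Str.count_eq, h1, h2, h3, chars_count_nl]
    rw [hcount]
    -- B's side
    rw [PySem.List.slice_from _ (by omega : (0:Int) ≤ (k : Int))]
    rw [show ((k : Int)).toNat = k from Int.toNat_natCast k]
    have hB := pvBullets_eq (((PySem.Str.split? message "\n").getD []).drop k) 5
    rw [show (((5:Nat)):Int) = (5:Int) from rfl] at hB
    rw [hB]
    -- A's side
    rw [extract_next_steps]
    rw [hsplit]
    rw [pv_core, hidx]
    rw [PySem.List.slice_to _ (by omega : (0:Int) ≤ 5)]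
    rfl
  -- now the four sign cases
  rw [extract_next_steps_alt]
  simp only [hf1, hf2]
  by_cases h1 : 0 ≤ f1 <;> by_cases h2 : 0 ≤ f2
  · -- both found
    have hfil : [f1, f2].filter (fun p => decide (0 ≤ p)) = [f1, f2] := by
      simp [h1, h2]
    rw [hfil]
    have hmin? : PySem.List.min? [f1, f2] (fun p => p) = some (if f2 < f1 then f2 else f1) := by
      simp only [PySem.List.min?, List.foldl_cons, List.foldl_nil]
      split <;> rfl
    rw [hmin?]
    set m := if f2 < f1 then f2 else f1 with hm
    have h0 : 0 ≤ m := by rw [hm]; split <;> omega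
    have hm1 : m ≤ f1 := by rw [hm]; split <;> omega
    have hm2 : m ≤ f2 := by rw [hm]; split <;> omega
    have hocc : "next step".toList <+: lcs.drop m.toNat ∨ "action item".toList <+: lcs.drop m.toNat := by
      rw [hm]; split
      · exact Or.inr (PySem.Chars.find_spec h2).1
      · exact Or.inl (PySem.Chars.find_spec h1).1
    have hmin : ∀ (P : List Char), (P = "next step".toList ∨ P = "action item".toList) →
        ∀ j : Nat, P <+: lcs.drop j → m.toNat ≤ j := by
      intro P hP j hj
      obtain ⟨hnn, hle⟩ := pv_occ_find lcs P j hj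
      rcases hP with rfl | rfl
      · omega
      · omega
    exact hfin m h0 hocc hmin
  · -- only "next step"
    have hfil : [f1, f2].filter (fun p => decide (0 ≤ p)) = [f1] := by
      simp [h1, h2]
    rw [hfil]
    have hmin? : PySem.List.min? [f1] (fun p => p) = some f1 := by simp [PySem.List.min?]
    rw [hmin?]
    have hocc : "next step".toList <+: lcs.drop f1.toNat ∨ "action item".toList <+: lcs.drop f1.toNat :=
      Or.inl (PySem.Chars.find_spec h1).1
    have hmin : ∀ (P : List Char), (P = "next step".toList ∨ P = "action item".toList) →
        ∀ j : Nat, P <+: lcs.drop j → f1.toNat ≤ j := by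
      intro P hP j hj
      obtain ⟨hnn, hle⟩ := pv_occ_find lcs P j hj
      rcases hP with rfl | rfl
      · omega
      · omega
    exact hfin f1 h1 hocc hmin
  · -- only "action item"
    have hfil : [f1, f2].filter (fun p => decide (0 ≤ p)) = [f2] := by
      simp [h1, h2]
    rw [hfil]
    have hmin? : PySem.List.min? [f2] (fun p => p) = some f2 := by simp [PySem.List.min?]
    rw [hmin?]
    have hocc : "next step".toList <+: lcs.drop f2.toNat ∨ "action item".toList <+: lcs.drop f2.toNat :=
      Or.inr (PySem.Chars.find_spec h2).1
    have hmin : ∀ (P : List Char), (P = "next step".toList ∨ P = "action item".toList) →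
        ∀ j : Nat, P <+: lcs.drop j → f2.toNat ≤ j := by
      intro P hP j hj
      obtain ⟨hnn, hle⟩ := pv_occ_find lcs P j hj
      rcases hP with rfl | rfl
      · omega
      · omega
    exact hfin f2 h2 hocc hmin
  · -- no marker anywhere: both sides []
    have hfil : [f1, f2].filter (fun p => decide (0 ≤ p)) = [] := by
      simp [h1, h2]
    rw [hfil]
    have hmin? : PySem.List.min? ([] : List Int) (fun p => p) = none := by simp [PySem.List.min?]
    rw [hmin?]
    -- A finds no trigger line
    have hnone : (((pvSplit [] message.toList).map String.ofList).findIdx? pvTrig) = none := by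
      rw [List.findIdx?_eq_none_iff]
      intro line hline
      obtain ⟨p, hp, rfl⟩ := List.mem_map.mp hline
      by_contra htr
      have htr' : pvTrig (String.ofList p) = true := by
        cases h : pvTrig (String.ofList p)
        · exact absurd h htr
        · rfl
      have hor : PySem.Chars.isIn "next step".toList (PySem.Chars.lower p) = true ∨
          PySem.Chars.isIn "action item".toList (PySem.Chars.lower p) = true := by
        have := htr'
        simp only [pvTrig, Bool.or_eq_true] at this
        simpa using this
      have hpl : PySem.Chars.lower p ∈ pvSplit [] lcs := by
        have hmap : pvSplit [] lcs = (pvSplit [] message.toList).map (List.map PySem.Chars.lowerChar) := by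
          have := pvSplit_map PySem.Chars.lowerChar rfl lowerChar_nl [] message.toList
          simpa using this
        rw [hmap]
        exact List.mem_map.mpr ⟨p, hp, rfl⟩
      have hinf : PySem.Chars.lower p <:+: lcs := by
        have := pvSplit_infix [] lcs _ hpl
        simpa using this
      obtain hP | hP := hor
      · have : PySem.Chars.isIn "next step".toList lcs = true := by
          rw [PySem.Chars.isIn_iff_infix]
          exact ((PySem.Chars.isIn_iff_infix _ _).mp hP).trans hinf
        have : 0 ≤ f1 := by rw [hf1d, PySem.Chars.find_nonneg_iff, ← PySem.Chars.isIn_iff_infix]; exact this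
        omega
      · have : PySem.Chars.isIn "action item".toList lcs = true := by
          rw [PySem.Chars.isIn_iff_infix]
          exact ((PySem.Chars.isIn_iff_infix _ _).mp hP).trans hinf
        have : 0 ≤ f2 := by rw [hf2d, PySem.Chars.find_nonneg_iff, ← PySem.Chars.isIn_iff_infix]; exact this
        omega
    rw [extract_next_steps]
    rw [hsplit, pv_core, hnone]
    simp [PySem.List.slice]

-- ===== VERDICT (by name: the statement is the Claim_ definition above) =====
theorem extract_next_steps_spec : Claim_equal_extract_next_steps := by
  intro message _
  unfold Spec_extract_next_steps
  exact pv_main message
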